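-- pv_equiv track=rewrite | github.com/kunal0011/myWorksSpace | python/src/Amazon/763partitionlabels.py | validate_partition
-- ===== SOURCE A (Python) =====
-- from typing import List
--
-- def validate_partition(s: str, partition_sizes: List[int]) -> bool:
--     """Helper function to validate partition result"""
--     if not partition_sizes or sum(partition_sizes) != len(s):
--         return False
--
--     start = 0
--     seen_chars = set()
--
--     for size in partition_sizes:
--         current_chars = set(s[start:start + size])
--         # Check if any character in current partition appears in other partitions
--         if any(s.find(c, start + size) != -1 or c in seen_chars for c in current_chars):
--             return False
--         seen_chars.update(current_chars)
--         start += size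
--
--     return True
-- ===== SOURCE B (Python) =====
-- from typing import List
--
-- def validate_partition(s: str, partition_sizes: List[int]) -> bool:
--     """Helper function to validate partition result"""
--     if not partition_sizes or sum(partition_sizes) != len(s):
--         return False
--
--     last = {}
--     for i, c in enumerate(s):
--         last[c] = i
--
--     end = 0
--     for size in partition_sizes:
--         end += size
--         if any(last[c] >= end for c in s[end - size:end]):
--             return False
--     return True
-- ===== Notes on version B (the rewrite author's own statement) =====
-- stated objective: alternative
-- what changed: Replaces A's per-block per-character s.find(c, end) rescans and cumulative seen-set with a last-occurrence dictionary built in one pass, checking each character's last index against its partition's end; Pre_ excludes lists containing a negative partition size that still sum to len(s), where A's negative-index slice/str.find wraparound acceptance is accidental.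
-- outside the precondition, e.g. on validate_partition('ab', [-1, 3]): A returns True, B returns False
import Mathlib
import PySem

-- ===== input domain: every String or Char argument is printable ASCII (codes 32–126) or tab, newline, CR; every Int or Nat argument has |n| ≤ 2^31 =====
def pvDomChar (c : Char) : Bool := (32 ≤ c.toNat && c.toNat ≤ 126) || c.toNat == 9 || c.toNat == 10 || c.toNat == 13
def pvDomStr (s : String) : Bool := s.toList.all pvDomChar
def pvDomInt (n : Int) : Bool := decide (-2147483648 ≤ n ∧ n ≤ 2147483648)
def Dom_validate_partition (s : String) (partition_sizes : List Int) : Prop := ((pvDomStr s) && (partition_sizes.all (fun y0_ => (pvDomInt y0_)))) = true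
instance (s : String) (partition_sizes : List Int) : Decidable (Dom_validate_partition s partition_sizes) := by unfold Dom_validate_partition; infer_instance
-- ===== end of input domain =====

-- B replaces A's per-character `s.find(c, end)` rescans and cumulative seen-set with a
-- last-occurrence dictionary built in one pass (objective: alternative algorithm).

-- ===== PORT A =====
-- loop 'for size in partition_sizes' with early return, state (start, seen_chars)
def vpLoopA (cs : List Char) (ps : List Int) (start : Int) (seen : PySem.Set Char) : Bool :=
  match ps with
  | [] => true
  | size :: rest =>
    let current : PySem.Set Char :=
      PySem.Set.ofList (PySem.List.slice cs (some start) (some (start + size)))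
    if current.any (fun c =>
        (PySem.Chars.findFrom cs [c] (start + size) none != -1) || seen.contains c)
    then false
    else vpLoopA cs rest (start + size) (PySem.Set.update seen current)

def validate_partition (s : String) (partition_sizes : List Int) : Bool :=
  if partition_sizes.isEmpty || partition_sizes.sum != (s.toList.length : Int) then false
  else vpLoopA s.toList partition_sizes 0 PySem.Set.empty

-- ===== PORT B =====
-- 'for i, c in enumerate(s): last[c] = i'
def vpLast (cs : List Char) : PySem.Dict Char Int :=
  (PySem.List.enumerate cs 0).foldl (fun d p => d.insert p.2 p.1) PySem.Dict.empty

-- loop 'for size in partition_sizes' with 'end += size' and the inner any-generator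
def vpLoopB (cs : List Char) (last : PySem.Dict Char Int) (ps : List Int) (endAcc : Int) : Bool :=
  match ps with
  | [] => true
  | size :: rest =>
    let e := endAcc + size
    if (PySem.List.slice cs (some (e - size)) (some e)).any
        (fun c => decide (last.getD c 0 ≥ e)) then false
    else vpLoopB cs last rest e

def validate_partition_alt (s : String) (partition_sizes : List Int) : Bool :=
  if partition_sizes.isEmpty || partition_sizes.sum != (s.toList.length : Int) then false
  else vpLoopB s.toList (vpLast s.toList) partition_sizes 0

-- ===== PRECONDITION & SPEC =====
-- Pre_ excludes lists containing a negative partition size whose total still equals len(s):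
-- there A's acceptance rests on accidental negative-index slice/str.find wraparound.
def Pre_validate_partition (s : String) (partition_sizes : List Int) : Prop :=
  partition_sizes.sum ≠ (s.toList.length : Int) ∨ ∀ x ∈ partition_sizes, 0 ≤ x
instance (s : String) (partition_sizes : List Int) : Decidable (Pre_validate_partition s partition_sizes) := by unfold Pre_validate_partition; infer_instance

def pvWitness_validate_partition : String × List Int := ("ab", [1, 1])

def Spec_validate_partition (s : String) (partition_sizes : List Int) (out : Bool) : Prop := out = validate_partition_alt s partition_sizes
instance (s : String) (partition_sizes : List Int) (out : Bool) : Decidable (Spec_validate_partition s partition_sizes out) := by unfold Spec_validate_partition; infer_instance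

-- ===== CLAIM (what is proved, stated in full; the proofs are below) =====
def Claim_equal_validate_partition : Prop := ∀ (s : String) (partition_sizes : List Int), Dom_validate_partition s partition_sizes → Pre_validate_partition s partition_sizes → Spec_validate_partition s partition_sizes (validate_partition s partition_sizes)

-- ===== LEMMAS AND PROOFS =====

-- s.find(c, t) succeeds exactly when c occurs at or after the clamped start index
theorem findFrom_ne_neg_one_iff (cs : List Char) (c : Char) (t : Int) :
    (PySem.Chars.findFrom cs [c] t none ≠ -1) ↔ c ∈ cs.drop (PySem.List.clampIdx cs.length t) := by
  have hnn : (0:Int) ≤ (cs.length : Int) := by positivity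
  unfold PySem.Chars.findFrom
  simp only [Int.toNat_natCast, List.take_length]
  set st : Int := if t < 0 then (if t + (cs.length:Int) < 0 then 0 else t + cs.length) else t with hst
  have hst0 : 0 ≤ st := by rw [hst]; split_ifs <;> omega
  by_cases hgt : (cs.length : Int) < st
  · rw [if_pos (by simpa using hgt)]
    have hclamp : PySem.List.clampIdx cs.length t = cs.length := by
      unfold PySem.List.clampIdx
      rw [hst] at hgt; split_ifs at hgt ⊢ <;> omega
    simp [hclamp]
  · rw [if_neg (by simpa using hgt)]
    have hclamp : PySem.List.clampIdx cs.length t = st.toNat := by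
      unfold PySem.List.clampIdx
      rw [hst] at hgt ⊢; split_ifs at hgt ⊢ <;> omega
    rw [hclamp]
    set r := PySem.Chars.find (cs.drop st.toNat) [c] with hr
    have hmem : r ≠ -1 ↔ c ∈ cs.drop st.toNat := by
      rw [hr, ne_eq, PySem.Chars.find_eq_neg_one_iff, List.singleton_infix_iff, not_not]
    split_ifs with h0
    · simp only [ne_eq, not_true_eq_false, false_iff]
      rw [← hmem]; simp [h0]
    · have hrpos : 0 ≤ r := by have := PySem.Chars.neg_one_le_find (cs.drop st.toNat) [c]; omega
      constructor
      · intro _; exact hmem.mp h0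
      · intro _; omega

theorem vpLast_append (xs : List Char) (x : Char) :
    vpLast (xs ++ [x]) = (vpLast xs).insert x (xs.length : Int) := by
  unfold vpLast
  rw [PySem.List.enumerate_append, List.foldl_append]
  simp

theorem mem_drop_append_singleton (xs : List Char) (x c : Char) (k : Nat) :
    c ∈ (xs ++ [x]).drop k ↔ c ∈ xs.drop k ∨ (c = x ∧ k ≤ xs.length) := by
  by_cases h : k ≤ xs.length
  · rw [List.drop_append_of_le_length h]
    simp [h, List.mem_append]
  · rw [List.drop_eq_nil_of_le (by simp; omega), List.drop_eq_nil_of_le (by omega)]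
    simp; omega

-- the dictionary holds each character's LAST index: it is ≥ k iff c still occurs in cs.drop k
theorem vpLast_getD_ge_iff (cs : List Char) (c : Char) (hc : c ∈ cs) (k : Nat) :
    ((vpLast cs).getD c 0 ≥ (k : Int)) ↔ c ∈ cs.drop k := by
  induction cs using List.reverseRecOn with
  | nil => simp at hc
  | append_singleton xs x ih =>
    rw [vpLast_append, PySem.Dict.getD_insert, mem_drop_append_singleton]
    by_cases hcx : c = x
    · rw [if_pos hcx]
      by_cases hcxs : c ∈ xs
      · rw [← ih hcxs]
        have hub : (vpLast xs).getD c 0 ≥ (k:Int) → (k:Int) ≤ xs.length := by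
          intro h
          by_contra hgt
          have : c ∈ xs.drop k := (ih hcxs).mp h
          rw [List.drop_eq_nil_of_le (by omega)] at this
          simp at this
        constructor
        · intro h; right; exact ⟨hcx, by exact_mod_cast h⟩
        · rintro (h | ⟨_, h⟩) <;> omega
      · have hfalse : ¬ c ∈ xs.drop k := fun h => hcxs (List.drop_subset _ _ h)
        simp only [hfalse, false_or]
        constructor
        · intro h; exact ⟨hcx, by exact_mod_cast h⟩
        · rintro ⟨_, h⟩; exact_mod_cast h
    · rw [if_neg hcx]
      have hcxs : c ∈ xs := by
        rcases List.mem_append.mp hc with h | h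
        · exact h
        · exact absurd (List.mem_singleton.mp h) hcx
      rw [ih hcxs]
      simp [hcx]

-- per-character bridge: A's find test equals B's last-index-vs-end test (nonnegative start)
theorem find_iff_last (cs : List Char) (c : Char) (hc : c ∈ cs) (t : Int) (ht : 0 ≤ t) :
    ((PySem.Chars.findFrom cs [c] t none ≠ -1) ↔ (vpLast cs).getD c 0 ≥ t) := by
  rw [findFrom_ne_neg_one_iff,
    ← vpLast_getD_ge_iff cs c hc (PySem.List.clampIdx cs.length t)]
  have hlt : ¬ ((vpLast cs).getD c 0 ≥ ((cs.length:Nat):Int)) := by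
    rw [vpLast_getD_ge_iff cs c hc cs.length]; simp
  unfold PySem.List.clampIdx
  split_ifs <;> push_cast at hlt ⊢ <;> omega

-- a character of a block starting at a nonnegative index has its last occurrence at or after it
theorem block_mem_last_ge (cs : List Char) (c : Char) (a b : Int) (ha : 0 ≤ a) (hb : 0 ≤ b)
    (hc : c ∈ PySem.List.slice cs (some a) (some b)) :
    c ∈ cs ∧ (vpLast cs).getD c 0 ≥ a := by
  have hcs : c ∈ cs := PySem.List.mem_of_mem_slice cs _ _ hc
  refine ⟨hcs, ?_⟩
  rw [PySem.List.slice_toNat cs ha hb] at hc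
  have hdrop : c ∈ cs.drop a.toNat := List.mem_of_mem_take hc
  have := (vpLast_getD_ge_iff cs c hcs a.toNat).mpr hdrop
  omega

-- the two loops agree while the seen-set holds only characters whose last occurrence is before start
theorem vpLoop_eq (cs : List Char) (ps : List Int) :
    ∀ (start : Int) (seen : PySem.Set Char), (∀ x ∈ ps, 0 ≤ x) → 0 ≤ start →
      (∀ c ∈ seen, c ∈ cs ∧ (vpLast cs).getD c 0 < start) →
      vpLoopA cs ps start seen = vpLoopB cs (vpLast cs) ps start := by
  induction ps with
  | nil => intro start seen _ _ _; rfl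
  | cons size rest ih =>
    intro start seen hpos hstart hseen
    have hsize : 0 ≤ size := hpos size (by simp)
    have he : 0 ≤ start + size := by omega
    unfold vpLoopA vpLoopB
    simp only []
    have hes : start + size - size = start := by ring
    rw [hes]
    set block := PySem.List.slice cs (some start) (some (start + size)) with hblock
    have hcond :
        (PySem.Set.ofList block).any (fun c =>
            (PySem.Chars.findFrom cs [c] (start + size) none != -1) || seen.contains c)
          = block.any (fun c => decide ((vpLast cs).getD c 0 ≥ start + size)) := by
      rw [Bool.eq_iff_iff, List.any_eq_true, List.any_eq_true]
      constructor
      · rintro ⟨c, hcmem, hp⟩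
        have hcb : c ∈ block := (PySem.Set.mem_ofList block c).mp hcmem
        obtain ⟨hcs, hga⟩ := block_mem_last_ge cs c start (start + size) hstart he hcb
        refine ⟨c, hcb, ?_⟩
        simp only [Bool.or_eq_true, bne_iff_ne, ne_eq, decide_eq_true_eq] at hp ⊢
        rcases hp with hp | hp
        · exact (find_iff_last cs c hcs (start + size) he).mp hp
        · have := (hseen c ((PySem.Set.contains_iff seen c).mp hp)).2
          omega
      · rintro ⟨c, hcb, hp⟩
        have hcs : c ∈ cs := PySem.List.mem_of_mem_slice cs _ _ hcb
        refine ⟨c, (PySem.Set.mem_ofList block c).mpr hcb, ?_⟩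
        simp only [Bool.or_eq_true, bne_iff_ne, ne_eq, decide_eq_true_eq] at hp ⊢
        exact Or.inl ((find_iff_last cs c hcs (start + size) he).mpr hp)
    rw [hcond]
    by_cases hb : (block.any (fun c => decide ((vpLast cs).getD c 0 ≥ start + size))) = true
    · rw [if_pos hb, if_pos hb]
    · rw [if_neg hb, if_neg hb]
      apply ih _ _ (fun x hx => hpos x (by simp [hx])) he
      intro c hc
      rcases (PySem.Set.mem_update seen _ c).mp hc with h | h
      · obtain ⟨h1, h2⟩ := hseen c h; exact ⟨h1, by omega⟩
      · have hcb : c ∈ block := (PySem.Set.mem_ofList block c).mp h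
        obtain ⟨hcs, _⟩ := block_mem_last_ge cs c start (start + size) hstart he hcb
        refine ⟨hcs, ?_⟩
        by_contra hge
        exact hb (List.any_eq_true.mpr ⟨c, hcb, by simp; omega⟩)

-- ===== VERDICT (by name: the statement is the Claim_ definition above) =====
theorem validate_partition_spec : Claim_equal_validate_partition := by
  intro s ps _ hpre
  unfold Spec_validate_partition validate_partition validate_partition_alt
  by_cases h : ps.isEmpty || ps.sum != (s.toList.length : Int)
  · rw [if_pos h, if_pos h]
  · rw [if_neg h, if_neg h]
    have hsum : ps.sum = (s.toList.length : Int) := by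
      simp only [Bool.or_eq_true, bne_iff_ne, ne_eq, not_or, not_not] at h
      exact h.2
    have hpos : ∀ x ∈ ps, 0 ≤ x := by
      rcases hpre with hp | hp
      · exact absurd hsum hp
      · exact hp
    exact vpLoop_eq s.toList ps 0 PySem.Set.empty hpos le_rfl (by intro c hc; simp [PySem.Set.empty] at hc)
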